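-- pv_equiv track=rewrite | github.com/ml-stat-Sustech/ConvexConcaveLoss | source/attacks/membership_inference/data_augmentation_attack.py | create_translation_augments
-- ===== SOURCE A (Python) =====
-- def create_translation_augments(d):
--     """
--     Create all possible combinations of translations that satisfy |i| + |j| = d
--     """
--     combinations = []
--     for i in range(-d, d + 1):
--         for j in range(-d, d + 1):
--             if abs(i) + abs(j) == d:
--                 combinations.append((i, j))
--     combinations.append((0,0))
--     return combinations
-- ===== SOURCE B (Python) =====
-- def create_translation_augments(d):
--     """
--     Create all possible combinations of translations that satisfy |i| + |j| = d
--     """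
--     rims = [(i, d - abs(i)) for i in range(-d, d + 1)]
--     pts = [p for (i, r) in rims
--              for p in ([(i, 0)] if r == 0 else [(i, -r), (i, r)])]
--     return pts + [(0, 0)]
-- ===== Notes on version B (the rewrite author's own statement) =====
-- stated objective: faster
-- what changed: Replaces A's O(d^2) nested scan over all (i,j) pairs with two staged comprehensions: one pass maps each i to its rim value r = d-|i|, a second pass expands each (i,r) into the one or two solutions j = +-r, preserving A's order.
import Mathlib
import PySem

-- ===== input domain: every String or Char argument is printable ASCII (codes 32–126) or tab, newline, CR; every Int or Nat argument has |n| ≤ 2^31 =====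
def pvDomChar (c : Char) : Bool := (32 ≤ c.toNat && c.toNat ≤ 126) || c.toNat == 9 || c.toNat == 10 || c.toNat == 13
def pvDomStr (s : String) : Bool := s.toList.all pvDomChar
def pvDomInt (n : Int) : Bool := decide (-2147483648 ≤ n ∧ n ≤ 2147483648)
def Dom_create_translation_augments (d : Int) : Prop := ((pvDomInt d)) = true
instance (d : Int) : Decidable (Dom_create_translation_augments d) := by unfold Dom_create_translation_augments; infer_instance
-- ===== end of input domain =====

-- B replaces A's O(d^2) nested scan by two staged passes: map each i to r = d-|i|, then expand each (i,r) to j = ±r (O(d)), same order.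

-- ===== PORT A =====
-- Python's abs(n) on ints (exact)
def pyAbs (n : Int) : Int := if n < 0 then -n else n

def create_translation_augments (d : Int) : List (Int × Int) :=
  let combinations : List (Int × Int) :=
    (PySem.List.pyRange (-d) (d + 1) 1).foldl (fun acc i =>
      (PySem.List.pyRange (-d) (d + 1) 1).foldl (fun acc2 j =>
        if pyAbs i + pyAbs j = d then acc2 ++ [(i, j)] else acc2) acc) []
  combinations ++ [(0, 0)]

-- ===== PORT B =====
def create_translation_augments_alt (d : Int) : List (Int × Int) :=
  let rims : List (Int × Int) := (PySem.List.pyRange (-d) (d + 1) 1).map (fun i => (i, d - pyAbs i))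
  let pts : List (Int × Int) := rims.flatMap (fun p =>
    if p.2 = 0 then [(p.1, 0)] else [(p.1, -p.2), (p.1, p.2)])
  pts ++ [(0, 0)]

-- ===== PRECONDITION & SPEC =====
def Spec_create_translation_augments (d : Int) (out : List (Int × Int)) : Prop := out = create_translation_augments_alt d
instance (d : Int) (out : List (Int × Int)) : Decidable (Spec_create_translation_augments d out) := by unfold Spec_create_translation_augments; infer_instance

-- ===== CLAIM (what is proved, stated in full; the proofs are below) =====
def Claim_equal_create_translation_augments : Prop := ∀ (d : Int), Dom_create_translation_augments d → Spec_create_translation_augments d (create_translation_augments d)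

-- ===== LEMMAS AND PROOFS =====

theorem pyAbs_eq (n : Int) : pyAbs n = |n| := by
  rcases abs_cases n with ⟨h1, h2⟩ | ⟨h1, h2⟩ <;> simp [pyAbs] <;> omega

-- The inner scan of A keeps exactly j = -(d-|i|) and j = d-|i| (one value if they coincide).
theorem pv_filter_char (d i : Int) (hi : -d ≤ i) (hi' : i < d + 1) :
    (PySem.List.pyRange (-d) (d + 1) 1).filter (fun j => decide (|i| + |j| = d)) =
      if d - |i| = 0 then [(0 : Int)] else [-(d - |i|), d - |i|] := by
  have hr : 0 ≤ d - |i| := by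
    rcases abs_cases i with ⟨h, _⟩ | ⟨h, _⟩ <;> omega
  have hmem : ∀ j : Int, (j ∈ (PySem.List.pyRange (-d) (d + 1) 1).filter (fun j => decide (|i| + |j| = d))) ↔
      (j = -(d - |i|) ∨ j = d - |i|) := by
    intro j
    simp only [List.mem_filter, PySem.List.mem_pyRange_one, decide_eq_true_eq]
    constructor
    · rintro ⟨⟨h1, h2⟩, h3⟩
      rcases abs_cases j with ⟨h, _⟩ | ⟨h, _⟩ <;> omega
    · rintro (rfl | rfl)
      · rcases abs_cases (-(d - |i|)) with ⟨h, _⟩ | ⟨h, _⟩ <;>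
        rcases abs_cases i with ⟨h', _⟩ | ⟨h', _⟩ <;> omega
      · rcases abs_cases (d - |i|) with ⟨h, _⟩ | ⟨h, _⟩ <;>
        rcases abs_cases i with ⟨h', _⟩ | ⟨h', _⟩ <;> omega
  have hnd : ((PySem.List.pyRange (-d) (d + 1) 1).filter (fun j => decide (|i| + |j| = d))).Nodup :=
    (PySem.List.nodup_pyRange_one _ _).filter _
  have hsorted : ((PySem.List.pyRange (-d) (d + 1) 1).filter (fun j => decide (|i| + |j| = d))).Pairwise (· < ·) :=
    (PySem.List.pairwise_lt_pyRange_one _ _).filter _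
  by_cases h0 : d - |i| = 0
  · simp only [h0]
    have hmem0 : ∀ j : Int, (j ∈ (PySem.List.pyRange (-d) (d + 1) 1).filter (fun j => decide (|i| + |j| = d))) ↔ j ∈ [(0 : Int)] := by
      intro j; rw [hmem]; simp; omega
    exact List.Perm.eq_of_pairwise (le := (· < ·))
      (fun a b _ _ h1 h2 => absurd h1 (asymm h2)) hsorted (by simp)
      ((List.perm_ext_iff_of_nodup hnd (by simp)).2 hmem0)
  · simp only [if_neg h0]
    have hmem0 : ∀ j : Int, (j ∈ (PySem.List.pyRange (-d) (d + 1) 1).filter (fun j => decide (|i| + |j| = d))) ↔ j ∈ [-(d - |i|), d - |i|] := by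
      intro j; rw [hmem]; simp
    exact List.Perm.eq_of_pairwise (le := (· < ·))
      (fun a b _ _ h1 h2 => absurd h1 (asymm h2)) hsorted (by simp; omega)
      ((List.perm_ext_iff_of_nodup hnd (by simp; omega)).2 hmem0)

theorem create_translation_augments_eq (d : Int) :
    create_translation_augments d = create_translation_augments_alt d := by
  unfold create_translation_augments create_translation_augments_alt
  simp only [pyAbs_eq]
  congr 1
  have hA : ∀ (i : Int) (acc : List (Int × Int)),
      (PySem.List.pyRange (-d) (d + 1) 1).foldl (fun acc2 j =>
        if |i| + |j| = d then acc2 ++ [(i, j)] else acc2) acc =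
      acc ++ ((PySem.List.pyRange (-d) (d + 1) 1).filter (fun j => decide (|i| + |j| = d))).map (fun j => (i, j)) := by
    intro i acc
    exact PySem.List.foldl_append_ite _ _ _ _
  calc (PySem.List.pyRange (-d) (d + 1) 1).foldl (fun acc i =>
        (PySem.List.pyRange (-d) (d + 1) 1).foldl (fun acc2 j =>
          if |i| + |j| = d then acc2 ++ [(i, j)] else acc2) acc) []
      = (PySem.List.pyRange (-d) (d + 1) 1).foldl (fun acc i =>
          acc ++ ((PySem.List.pyRange (-d) (d + 1) 1).filter (fun j => decide (|i| + |j| = d))).map (fun j => (i, j))) [] := by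
        exact List.foldl_ext _ _ [] (fun acc i _ => hA i acc)
    _ = (PySem.List.pyRange (-d) (d + 1) 1).flatMap (fun i =>
          ((PySem.List.pyRange (-d) (d + 1) 1).filter (fun j => decide (|i| + |j| = d))).map (fun j => (i, j))) := by
        simp [List.flatMap]
    _ = ((PySem.List.pyRange (-d) (d + 1) 1).map (fun i => (i, d - |i|))).flatMap (fun p =>
          if p.2 = 0 then [(p.1, 0)] else [(p.1, -p.2), (p.1, p.2)]) := by
        rw [List.flatMap_map]
        refine List.flatMap_congr (fun i hi => ?_)
        rw [PySem.List.mem_pyRange_one] at hi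
        rw [pv_filter_char d i hi.1 hi.2]
        split_ifs with h <;> simp

-- ===== VERDICT (by name: the statement is the Claim_ definition above) =====
theorem create_translation_augments_spec : Claim_equal_create_translation_augments := by
  intro d _
  exact create_translation_augments_eq d
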